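-- pv_equiv track=rewrite | github.com/yamaton/CodeForces | problemSet/510A-Fox_And_Snake.py | solve
-- ===== SOURCE A (Python) =====
-- def solve(n, m):
--     grid = [['.'] * m for _ in range(n)]
--     for i in range(0, n, 2):
--         grid[i] = '#' * m
--
--     for i in range(1, n, 2):
--         if i % 4 == 1:
--             grid[i][-1] = '#'
--         elif i % 4 == 3:
--             grid[i][0] = '#'
--
--     return '\n'.join(''.join(xs) for xs in grid)
-- ===== SOURCE B (Python) =====
-- def solve(n, m):
--     if n <= 0:
--         return ''
--     block = ['#' * m, '.' * (m - 1) + '#', '#' * m, '#' + '.' * (m - 1)]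
--     return '\n'.join((block * ((n + 3) // 4))[:n])
-- ===== Notes on version B (the rewrite author's own statement) =====
-- stated objective: simpler
-- what changed: B tiles a constant 4-row period block by list repetition and truncates to n rows, instead of allocating a mutable char grid and patching it with two further index passes keyed on i%2 and i%4; no per-row index arithmetic or mutation remains.
import Mathlib
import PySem

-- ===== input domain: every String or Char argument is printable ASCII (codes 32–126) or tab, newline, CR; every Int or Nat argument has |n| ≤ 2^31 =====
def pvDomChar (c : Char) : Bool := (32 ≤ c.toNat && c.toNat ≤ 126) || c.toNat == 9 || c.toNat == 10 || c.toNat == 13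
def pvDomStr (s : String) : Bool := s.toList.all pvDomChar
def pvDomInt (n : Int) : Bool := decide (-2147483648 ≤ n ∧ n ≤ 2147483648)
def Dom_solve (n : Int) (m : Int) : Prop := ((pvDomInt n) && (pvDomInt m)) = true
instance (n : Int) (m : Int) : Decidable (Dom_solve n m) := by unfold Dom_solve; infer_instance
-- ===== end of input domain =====

-- B tiles a constant 4-row period block by list repetition and truncates to n rows,
-- instead of allocating a mutable char grid and patching it in two further index passes; same cost, simpler.

-- ===== PORT A =====
-- grid rows are List Char; '#'*m / '.'*m is List.replicate m.toNat (exact: Python's str*k is empty for k ≤ 0);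
-- grid[i][-1] = '#' / grid[i][0] = '#' are ported as List.set on the row (exact on nonempty rows;
-- Python raises IndexError on an empty row — Pre_solve excludes exactly that);
-- ''.join over a row of chars is String.mk, '\n'.join is PySem.Str.join.
def solve (n : Int) (m : Int) : String :=
  let grid := (PySem.List.pyRange 0 n 1).map (fun _ => List.replicate m.toNat '.')
  let grid := (PySem.List.pyRange 0 n 2).foldl
      (fun g i => g.set i.toNat (List.replicate m.toNat '#')) grid
  let grid := (PySem.List.pyRange 1 n 2).foldl
      (fun g i =>
        if PySem.Int.mod i 4 == 1 then
          g.set i.toNat ((g.getD i.toNat []).set ((g.getD i.toNat []).length - 1) '#')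
        else if PySem.Int.mod i 4 == 3 then
          g.set i.toNat ((g.getD i.toNat []).set 0 '#')
        else g) grid
  PySem.Str.join "\n" (grid.map String.mk)

-- ===== PORT B =====
-- Source B: block = ['#'*m, '.'*(m-1)+'#', '#'*m, '#'+'.'*(m-1)]; '\n'.join((block * ((n+3)//4))[:n]).
-- list * k is flatten of replicate k.toNat (exact: empty for k ≤ 0); [:n] is PySem.List.slice.
def blockB (m : Int) : List String :=
  [String.mk (List.replicate m.toNat '#'),
   String.mk (List.replicate (m - 1).toNat '.' ++ ['#']),
   String.mk (List.replicate m.toNat '#'),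
   String.mk ('#' :: List.replicate (m - 1).toNat '.')]

def solve_alt (n : Int) (m : Int) : String :=
  if n ≤ 0 then ""
  else
    PySem.Str.join "\n"
      (PySem.List.slice ((List.replicate (PySem.Int.floordiv (n + 3) 4).toNat (blockB m)).flatten)
        none (some n))

-- ===== PRECONDITION & SPEC =====
-- A raises IndexError when some odd row exists (n ≥ 2) and the rows are empty (m ≤ 0): grid[i][-1] on [].
def Pre_solve (n : Int) (m : Int) : Prop := 1 ≤ m ∨ n ≤ 1
instance (n : Int) (m : Int) : Decidable (Pre_solve n m) := by unfold Pre_solve; infer_instance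
def pvWitness_solve : Int × Int := (3, 4)

def Spec_solve (n : Int) (m : Int) (out : String) : Prop := out = solve_alt n m
instance (n : Int) (m : Int) (out : String) : Decidable (Spec_solve n m out) := by unfold Spec_solve; infer_instance

-- ===== CLAIM (what is proved, stated in full; the proofs are below) =====
def Claim_equal_solve : Prop := ∀ (n : Int) (m : Int), Dom_solve n m → Pre_solve n m → Spec_solve n m (solve n m)
-- ===== LEMMAS AND PROOFS =====

-- proof-side row description: row i of the finished snake grid
def rowB (m : Int) (i : Int) : List Char :=
  if PySem.Int.mod i 2 == 0 then List.replicate m.toNat '#'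
  else if PySem.Int.mod i 4 == 1 then List.replicate (m - 1).toNat '.' ++ ['#']
  else '#' :: List.replicate (m - 1).toNat '.'

-- a pass 'for i in I: g[i] = u(i, g[i])' over distinct nonnegative indices, read pointwise
lemma foldl_set_getElem? {α : Type} (u : Int → α → α) (d : α) :
    ∀ (is : List Int) (g : List α) (k : Nat), is.Nodup → (∀ i ∈ is, 0 ≤ i) →
      (is.foldl (fun g i => g.set i.toNat (u i (g.getD i.toNat d))) g)[k]? =
      if (k : Int) ∈ is then (g[k]?).map (u (k : Int)) else g[k]? := by
  intro is
  induction is with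
  | nil => intro g k _ _; simp
  | cons i is ih =>
    intro g k hnd hnn
    have hi0 : 0 ≤ i := hnn i (by simp)
    simp only [List.foldl_cons]
    rw [ih _ k hnd.of_cons (fun j hj => hnn j (by simp [hj]))]
    by_cases hk : (k : Int) ∈ is
    · have hik : i ≠ (k : Int) := fun h => (List.nodup_cons.mp hnd).1 (h ▸ hk)
      have : i.toNat ≠ k := by omega
      simp [hk, List.getElem?_set_ne this]
    · by_cases hik : (k : Int) = i
      · subst hik
        rw [if_neg hk, if_pos List.mem_cons_self]
        have hkt : (k : Int).toNat = k := by omega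
        rw [hkt]
        by_cases hlt : k < g.length
        · rw [List.getElem?_set_self hlt]
          simp [List.getD, List.getElem?_eq_getElem hlt]
        · rw [List.set_eq_of_length_le (Nat.le_of_not_lt hlt)]
          simp [List.getElem?_eq_none (Nat.le_of_not_lt hlt)]
      · have : i.toNat ≠ k := by omega
        simp [hk, hik, List.getElem?_set_ne this]

lemma nodup_pyRange_two (a b : Int) : (PySem.List.pyRange a b 2).Nodup := by
  rw [PySem.List.pyRange_of_pos a b (by norm_num)]
  exact List.nodup_range.map (fun x y h => by omega)

lemma nonneg_of_mem_pyRange_two {a b i : Int} (ha : 0 ≤ a) (h : i ∈ PySem.List.pyRange a b 2) : 0 ≤ i := by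
  have := (PySem.List.mem_pyRange_iff_of_pos (by norm_num : (0:Int) < 2) i).mp h
  omega

lemma set_last_replicate (t : Nat) (c d : Char) :
    (List.replicate (t + 1) c).set t d = List.replicate t c ++ [d] := by
  induction t with
  | zero => simp
  | succ t ih =>
    rw [List.replicate_succ (n := t + 1), List.set_cons_succ, ih, List.replicate_succ]
    rfl

-- the grid A builds equals the rows rowB describes, pointwise via the two passes
set_option maxRecDepth 4096 in
lemma grid_eq (n m : Int) (hm : Pre_solve n m) :
    ((PySem.List.pyRange 1 n 2).foldl
      (fun g i =>
        if PySem.Int.mod i 4 == 1 then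
          g.set i.toNat ((g.getD i.toNat []).set ((g.getD i.toNat []).length - 1) '#')
        else if PySem.Int.mod i 4 == 3 then
          g.set i.toNat ((g.getD i.toNat []).set 0 '#')
        else g)
      ((PySem.List.pyRange 0 n 2).foldl
        (fun g i => g.set i.toNat (List.replicate m.toNat '#'))
        ((PySem.List.pyRange 0 n 1).map (fun _ => List.replicate m.toNat '.'))))
    = (PySem.List.pyRange 0 n 1).map (rowB m) := by
  set u₂ : Int → List Char → List Char := fun i a =>
    if PySem.Int.mod i 4 == 1 then a.set (a.length - 1) '#' else a.set 0 '#' with hu₂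
  set u₁ : Int → List Char → List Char := fun _ _ => List.replicate m.toNat '#' with hu₁
  rw [PySem.List.foldl_congr_mem _ _
    (fun g i => g.set i.toNat (u₂ i (g.getD i.toNat []))) _
    (by
      intro g i hi
      have hmem := (PySem.List.mem_pyRange_iff_of_pos (by norm_num : (0:Int) < 2) i).mp hi
      have e4 : PySem.Int.mod i 4 = i % 4 := PySem.Int.mod_eq_emod_of_pos (by norm_num)
      have h4 : i % 4 = 1 ∨ i % 4 = 3 := by omega
      rcases h4 with h | h <;> simp [hu₂, h])]
  have hb1 : (fun (g : List (List Char)) (i : Int) => g.set i.toNat (List.replicate m.toNat '#'))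
      = fun g i => g.set i.toNat (u₁ i (g.getD i.toNat [])) := rfl
  rw [hb1]
  apply List.ext_getElem?
  intro k
  rw [foldl_set_getElem? u₂ [] _ _ k (nodup_pyRange_two 1 n)
        (fun i hi => nonneg_of_mem_pyRange_two (by norm_num) hi),
      foldl_set_getElem? u₁ [] _ _ k (nodup_pyRange_two 0 n)
        (fun i hi => nonneg_of_mem_pyRange_two le_rfl hi)]
  have hg0 : ((PySem.List.pyRange 0 n 1).map (fun _ => List.replicate m.toNat '.'))[k]?
      = if k < (n - 0).toNat then some (List.replicate m.toNat '.') else none := by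
    rw [List.getElem?_map, PySem.List.getElem?_pyRange_one]
    split_ifs <;> simp
  have hrhs : ((PySem.List.pyRange 0 n 1).map (rowB m))[k]?
      = if k < (n - 0).toNat then some (rowB m (0 + (k : Int))) else none := by
    rw [List.getElem?_map, PySem.List.getElem?_pyRange_one]
    split_ifs <;> simp
  rw [hg0, hrhs]
  by_cases hkn : k < (n - 0).toNat
  · have hk_lt : (k : Int) < n := by omega
    rw [if_pos hkn, if_pos hkn]
    by_cases hke : 2 ∣ (k : Int)
    · -- even row: set to '#'*m by pass 1, untouched by pass 2
      have h1 : (k : Int) ∈ PySem.List.pyRange 0 n 2 := by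
        rw [PySem.List.mem_pyRange_iff_of_pos (by norm_num)]
        refine ⟨by omega, by omega, by simpa using hke⟩
      have h2 : (k : Int) ∉ PySem.List.pyRange 1 n 2 := by
        rw [PySem.List.mem_pyRange_iff_of_pos (by norm_num)]
        omega
      have e2 : PySem.Int.mod (k : Int) 2 = (k : Int) % 2 := PySem.Int.mod_eq_emod_of_pos (by norm_num)
      have hk2 : (k : Int) % 2 = 0 := by omega
      simp [h1, h2, hu₁, rowB, hk2]
    · -- odd row: untouched by pass 1, single '#' poked by pass 2
      have h1 : (k : Int) ∉ PySem.List.pyRange 0 n 2 := by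
        rw [PySem.List.mem_pyRange_iff_of_pos (by norm_num)]
        omega
      have h2 : (k : Int) ∈ PySem.List.pyRange 1 n 2 := by
        rw [PySem.List.mem_pyRange_iff_of_pos (by norm_num)]
        refine ⟨by omega, by omega, by omega⟩
      have hm1 : 1 ≤ m := by
        rcases hm with h | h
        · exact h
        · exfalso; omega
      have hmt : m.toNat = (m - 1).toNat + 1 := by omega
      have e2 : PySem.Int.mod (k : Int) 2 = (k : Int) % 2 := PySem.Int.mod_eq_emod_of_pos (by norm_num)
      have e4 : PySem.Int.mod (k : Int) 4 = (k : Int) % 4 := PySem.Int.mod_eq_emod_of_pos (by norm_num)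
      have hk2 : ¬ ((k : Int) % 2 = 0) := by omega
      have h4 : (k : Int) % 4 = 1 ∨ (k : Int) % 4 = 3 := by omega
      simp only [h2, h1, if_pos, if_neg, not_false_iff]
      rw [zero_add]
      have hc2 : (PySem.Int.mod (k : Int) 2 == 0) = false := by
        rw [e2]; simp only [beq_eq_false_iff_ne, ne_eq]; omega
      rcases h4 with h | h
      · have hc4 : (PySem.Int.mod (k : Int) 4 == 1) = true := by rw [e4, h]; decide
        simp only [Option.map_some, Option.some.injEq, hu₂, rowB, hc4, hc2, if_true,
          Bool.false_eq_true, if_false]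
        rw [List.length_replicate, hmt, Nat.add_sub_cancel, set_last_replicate]
      · have hc4 : (PySem.Int.mod (k : Int) 4 == 1) = false := by rw [e4, h]; decide
        simp only [Option.map_some, Option.some.injEq, hu₂, rowB, hc4, hc2,
          Bool.false_eq_true, if_false]
        rw [hmt, List.replicate_succ, List.set_cons_zero]
  · rw [if_neg hkn, if_neg hkn]
    have h2 : (k : Int) ∉ PySem.List.pyRange 1 n 2 := by
      rw [PySem.List.mem_pyRange_iff_of_pos (by norm_num)]
      omega
    have h1 : (k : Int) ∉ PySem.List.pyRange 0 n 2 := by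
      rw [PySem.List.mem_pyRange_iff_of_pos (by norm_num)]
      omega
    simp [h1, h2]

-- flatten of r copies of a 4-element block, read pointwise
lemma flatten_replicate_getElem? {α : Type} (bl : List α) (hl : bl.length = 4) :
    ∀ (r k : Nat), k < 4 * r → (List.replicate r bl).flatten[k]? = bl[k % 4]? := by
  intro r
  induction r with
  | zero => intro k hk; omega
  | succ r ih =>
    intro k hk
    rw [List.replicate_succ, List.flatten_cons]
    by_cases h4 : k < 4
    · rw [List.getElem?_append_left (by omega), Nat.mod_eq_of_lt h4]
    · rw [List.getElem?_append_right (by omega), hl, ih (k - 4) (by omega)]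
      congr 1
      omega

-- the tiled-and-truncated block equals the row list
lemma tile_eq_rows (n m : Int) :
    PySem.List.slice ((List.replicate (PySem.Int.floordiv (n + 3) 4).toNat (blockB m)).flatten)
        none (some n)
      = (PySem.List.pyRange 0 n 1).map (fun i => String.mk (rowB m i)) := by
  by_cases hn : n ≤ 0
  · have hr : (PySem.Int.floordiv (n + 3) 4).toNat = 0 := by
      have := PySem.Int.floordiv_lt_iff_lt_mul (a := n + 3) (b := 4) (q := 1) (by norm_num)
      omega
    rw [hr, PySem.List.pyRange_one_eq_nil (by omega)]
    simp [PySem.List.slice]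
  · have hn0 : 0 ≤ n := by omega
    have hbd := (PySem.Int.floordiv_eq_iff_of_pos (a := n + 3) (b := 4)
        (q := PySem.Int.floordiv (n + 3) 4) (by norm_num)).mp rfl
    rw [PySem.List.slice_to _ hn0]
    apply List.ext_getElem?
    intro k
    rw [List.getElem?_take, List.getElem?_map, PySem.List.getElem?_pyRange_one]
    by_cases hk : k < n.toNat
    · have hk4 : k < 4 * (PySem.Int.floordiv (n + 3) 4).toNat := by omega
      rw [if_pos hk, if_pos (by omega),
        flatten_replicate_getElem? (blockB m) (by simp [blockB]) _ k hk4]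
      have hi : (0 : Int) + (k : Int) = (k : Int) := zero_add _
      rw [hi]
      have e2 : PySem.Int.mod (k : Int) 2 = (k : Int) % 2 :=
        PySem.Int.mod_eq_emod_of_pos (by norm_num)
      have e4 : PySem.Int.mod (k : Int) 4 = (k : Int) % 4 :=
        PySem.Int.mod_eq_emod_of_pos (by norm_num)
      have h4 : k % 4 = 0 ∨ k % 4 = 1 ∨ k % 4 = 2 ∨ k % 4 = 3 := by omega
      rcases h4 with h | h | h | h
      · have h2 : (k : Int) % 2 = 0 := by omega
        have hr : rowB m (k : Int) = List.replicate m.toNat '#' := by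
          unfold rowB; rw [e2, h2]; rfl
        rw [h]; simp only [Option.map_some]; rw [hr]; rfl
      · have h2 : (k : Int) % 2 = 1 := by omega
        have h4i : (k : Int) % 4 = 1 := by omega
        have hr : rowB m (k : Int) = List.replicate (m - 1).toNat '.' ++ ['#'] := by
          unfold rowB; rw [e2, h2, e4, h4i]; rfl
        rw [h]; simp only [Option.map_some]; rw [hr]; rfl
      · have h2 : (k : Int) % 2 = 0 := by omega
        have hr : rowB m (k : Int) = List.replicate m.toNat '#' := by
          unfold rowB; rw [e2, h2]; rfl
        rw [h]; simp only [Option.map_some]; rw [hr]; rfl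
      · have h2 : (k : Int) % 2 = 1 := by omega
        have h4i : (k : Int) % 4 = 3 := by omega
        have hr : rowB m (k : Int) = '#' :: List.replicate (m - 1).toNat '.' := by
          unfold rowB; rw [e2, h2, e4, h4i]; rfl
        rw [h]; simp only [Option.map_some]; rw [hr]; rfl
    · rw [if_neg hk, if_neg (by omega)]
      rfl

-- ===== VERDICT (by name: the statement is the Claim_ definition above) =====
theorem solve_spec : Claim_equal_solve := by
  intro n m _ hpre
  unfold Spec_solve
  simp only [solve, solve_alt]
  rw [grid_eq n m hpre]
  by_cases hn : n ≤ 0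
  · rw [if_pos hn, PySem.List.pyRange_one_eq_nil (by omega)]
    rfl
  · rw [if_neg hn, List.map_map, tile_eq_rows]
    rfl
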